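-- pv_equiv track=rewrite | github.com/gongdonghui/chat-wx | test_large_sensitive_words.py | generate_large_sensitive_words
-- ===== SOURCE A (Python) =====
-- def generate_large_sensitive_words(count=10000):
--     """生成大量敏感词"""
--     sensitive_words = []
--     for i in range(count):
--         # 生成不同长度的敏感词
--         if i % 10 == 0:
--             word = f"敏感词{i:05d}"
--         elif i % 10 == 1:
--             word = f"违法内容{i:05d}"
--         elif i % 10 == 2:
--             word = f"暴力行为{i:05d}"
--         elif i % 10 == 3:
--             word = f"赌博活动{i:05d}"
--         elif i % 10 == 4:
--             word = f"色情内容{i:05d}"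
--         elif i % 10 == 5:
--             word = f"恐怖主义{i:05d}"
--         elif i % 10 == 6:
--             word = f"反动言论{i:05d}"
--         elif i % 10 == 7:
--             word = f"邪教组织{i:05d}"
--         elif i % 10 == 8:
--             word = f"毒品交易{i:05d}"
--         else:
--             word = f"诈骗行为{i:05d}"
--         sensitive_words.append(word)
--     return sensitive_words
-- ===== SOURCE B (Python) =====
-- PREFIXES = ["敏感词", "违法内容", "暴力行为", "赌博活动", "色情内容",
--             "恐怖主义", "反动言论", "邪教组织", "毒品交易", "诈骗行为"]
--
-- def generate_large_sensitive_words(count=10000):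
--     """生成大量敏感词"""
--     # Generate full 10-word blocks (one word per prefix via enumerate over the
--     # fixed prefix table), then truncate the last partial block with a slice.
--     words = []
--     for block in range((count + 9) // 10):
--         base = 10 * block
--         words.extend(p + format(base + j, "05d") for j, p in enumerate(PREFIXES))
--     return words[:count]
-- ===== Notes on version B (the rewrite author's own statement) =====
-- stated objective: alternative
-- what changed: Instead of A's single pass with a ten-way if/elif cascade per index, B generates whole blocks of one word per prefix by enumerating the fixed prefix table once per block (outer loop over blocks, inner zip over the table) and truncates the last partial block with a slice.
import Mathlib
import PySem

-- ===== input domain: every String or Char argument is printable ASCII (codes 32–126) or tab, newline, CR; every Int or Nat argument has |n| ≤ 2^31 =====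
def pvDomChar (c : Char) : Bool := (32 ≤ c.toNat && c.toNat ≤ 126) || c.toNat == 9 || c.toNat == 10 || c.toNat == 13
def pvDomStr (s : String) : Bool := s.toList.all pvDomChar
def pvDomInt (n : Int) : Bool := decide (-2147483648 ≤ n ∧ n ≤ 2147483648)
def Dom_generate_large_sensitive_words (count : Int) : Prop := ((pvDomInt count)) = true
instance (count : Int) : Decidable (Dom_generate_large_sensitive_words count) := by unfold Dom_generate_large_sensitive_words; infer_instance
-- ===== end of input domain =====

-- B generates whole 10-word blocks by walking the fixed prefix table with enumerate and truncates the last partial block with a slice, instead of A's per-index ten-way if/elif cascade (objective: alternative).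
-- ===== PORT A =====
-- shared helper: Python's f"{i:05d}" for the nonnegative i both programs format
def pvFmt05 (i : Int) : List Char :=
  let s := PySem.Int.toChars i
  List.replicate (5 - s.length) '0' ++ s

def generate_large_sensitive_words (count : Int) : List String :=
  (PySem.List.pyRange 0 count 1).foldl (fun sensitive_words i =>
    let word :=
      if PySem.Int.mod i 10 = 0 then String.ofList ("敏感词".toList ++ pvFmt05 i)
      else if PySem.Int.mod i 10 = 1 then String.ofList ("违法内容".toList ++ pvFmt05 i)
      else if PySem.Int.mod i 10 = 2 then String.ofList ("暴力行为".toList ++ pvFmt05 i)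
      else if PySem.Int.mod i 10 = 3 then String.ofList ("赌博活动".toList ++ pvFmt05 i)
      else if PySem.Int.mod i 10 = 4 then String.ofList ("色情内容".toList ++ pvFmt05 i)
      else if PySem.Int.mod i 10 = 5 then String.ofList ("恐怖主义".toList ++ pvFmt05 i)
      else if PySem.Int.mod i 10 = 6 then String.ofList ("反动言论".toList ++ pvFmt05 i)
      else if PySem.Int.mod i 10 = 7 then String.ofList ("邪教组织".toList ++ pvFmt05 i)
      else if PySem.Int.mod i 10 = 8 then String.ofList ("毒品交易".toList ++ pvFmt05 i)
      else String.ofList ("诈骗行为".toList ++ pvFmt05 i)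
    sensitive_words ++ [word]) []

-- ===== PORT B =====
def pvPrefixes : List String :=
  ["敏感词", "违法内容", "暴力行为", "赌博活动", "色情内容",
   "恐怖主义", "反动言论", "邪教组织", "毒品交易", "诈骗行为"]

def generate_large_sensitive_words_alt (count : Int) : List String :=
  let words := (PySem.List.pyRange 0 (PySem.Int.floordiv (count + 9) 10) 1).foldl
    (fun words block =>
      words ++ (PySem.List.enumerate pvPrefixes 0).map
        (fun jp => String.ofList (jp.2.toList ++ pvFmt05 (10 * block + jp.1)))) []
  PySem.List.slice words none (some count)

-- ===== PRECONDITION & SPEC =====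
def Spec_generate_large_sensitive_words (count : Int) (out : List String) : Prop := out = generate_large_sensitive_words_alt count
instance (count : Int) (out : List String) : Decidable (Spec_generate_large_sensitive_words count out) := by unfold Spec_generate_large_sensitive_words; infer_instance

-- ===== CLAIM =====
def Claim_equal_generate_large_sensitive_words : Prop := ∀ (count : Int), Dom_generate_large_sensitive_words count → Spec_generate_large_sensitive_words count (generate_large_sensitive_words count)

-- ===== LEMMAS AND PROOFS =====
-- canonical per-index word: prefix looked up by i % 10, then the 05d-formatted index
def pvWordAt (i : Int) : String :=
  String.ofList ((PySem.List.pyGetD pvPrefixes (PySem.Int.mod i 10) "").toList ++ pvFmt05 i)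

lemma pvElem_eq (i : Int) :
    (if PySem.Int.mod i 10 = 0 then String.ofList ("敏感词".toList ++ pvFmt05 i)
      else if PySem.Int.mod i 10 = 1 then String.ofList ("违法内容".toList ++ pvFmt05 i)
      else if PySem.Int.mod i 10 = 2 then String.ofList ("暴力行为".toList ++ pvFmt05 i)
      else if PySem.Int.mod i 10 = 3 then String.ofList ("赌博活动".toList ++ pvFmt05 i)
      else if PySem.Int.mod i 10 = 4 then String.ofList ("色情内容".toList ++ pvFmt05 i)
      else if PySem.Int.mod i 10 = 5 then String.ofList ("恐怖主义".toList ++ pvFmt05 i)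
      else if PySem.Int.mod i 10 = 6 then String.ofList ("反动言论".toList ++ pvFmt05 i)
      else if PySem.Int.mod i 10 = 7 then String.ofList ("邪教组织".toList ++ pvFmt05 i)
      else if PySem.Int.mod i 10 = 8 then String.ofList ("毒品交易".toList ++ pvFmt05 i)
      else String.ofList ("诈骗行为".toList ++ pvFmt05 i)) = pvWordAt i := by
  have h0 : (0 : Int) ≤ PySem.Int.mod i 10 := PySem.Int.mod_nonneg i (by omega)
  have h1 : PySem.Int.mod i 10 < 10 := PySem.Int.mod_lt i (by omega)
  have : PySem.Int.mod i 10 = 0 ∨ PySem.Int.mod i 10 = 1 ∨ PySem.Int.mod i 10 = 2 ∨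
      PySem.Int.mod i 10 = 3 ∨ PySem.Int.mod i 10 = 4 ∨ PySem.Int.mod i 10 = 5 ∨
      PySem.Int.mod i 10 = 6 ∨ PySem.Int.mod i 10 = 7 ∨ PySem.Int.mod i 10 = 8 ∨
      PySem.Int.mod i 10 = 9 := by omega
  rcases this with h | h | h | h | h | h | h | h | h | h <;>
    · simp only [h, pvWordAt]
      simp [pvPrefixes, PySem.List.pyGetD, PySem.List.pyGet?, PySem.List.pyIdx?]

lemma pvA_eq_map (count : Int) :
    generate_large_sensitive_words count = (PySem.List.pyRange 0 count 1).map pvWordAt := by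
  unfold generate_large_sensitive_words
  rw [PySem.List.foldl_append_singleton_eq_map]
  exact List.map_congr_left (fun i _ => pvElem_eq i)

-- one full block equals ten consecutive canonical words
lemma pvBlock_eq (b : Int) :
    (PySem.List.enumerate pvPrefixes 0).map
      (fun jp => String.ofList (jp.2.toList ++ pvFmt05 (10 * b + jp.1))) =
    (PySem.List.pyRange (10 * b) (10 * b + 10) 1).map pvWordAt := by
  rw [PySem.List.enumerate_eq_map_pyRange (d := "")]
  have hlen : PySem.List.len pvPrefixes = (10 : Int) := by decide
  rw [hlen, PySem.List.pyRange_one 0 10, PySem.List.pyRange_one (10 * b) (10 * b + 10)]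
  have h10 : ((10 : Int) - 0).toNat = 10 := by omega
  have h10' : ((10 * b + 10) - 10 * b).toNat = 10 := by omega
  rw [h10, h10']
  simp only [List.map_map]
  apply List.map_congr_left
  intro k hk
  have hk10 : (k : Int) < 10 := by exact_mod_cast List.mem_range.mp hk
  have hkm : ((k : Int) % 10) = (k : Int) := by omega
  simp [pvWordAt, hkm]

-- the block loop, flattened, is the canonical map over the first 10*m indices
lemma pvBlocks_eq (m : Nat) :
    (PySem.List.pyRange 0 (m : Int) 1).flatMap
      (fun b => (PySem.List.pyRange (10 * b) (10 * b + 10) 1).map pvWordAt) =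
    (PySem.List.pyRange 0 (10 * (m : Int)) 1).map pvWordAt := by
  induction m with
  | zero => simp [PySem.List.pyRange_one_eq_nil]
  | succ n ih =>
    have hc : ((n + 1 : Nat) : Int) = (n : Int) + 1 := by push_cast; ring
    rw [hc, PySem.List.pyRange_one_succ_right (a := 0) (b := (n : Int)) (by omega),
      List.flatMap_append, ih]
    have hsplit : PySem.List.pyRange 0 (10 * ((n : Int) + 1)) 1 =
        PySem.List.pyRange 0 (10 * (n : Int)) 1 ++
        PySem.List.pyRange (10 * (n : Int)) (10 * ((n : Int) + 1)) 1 :=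
      PySem.List.pyRange_one_append 0 (10 * (n : Int)) _ (by omega) (by omega)
    rw [hsplit, List.map_append]
    simp only [List.flatMap_cons, List.flatMap_nil, List.append_nil]
    congr 3

-- ===== VERDICT =====
theorem generate_large_sensitive_words_spec : Claim_equal_generate_large_sensitive_words := by
  intro count _
  unfold Spec_generate_large_sensitive_words generate_large_sensitive_words_alt
  rw [PySem.List.foldl_append_eq_flatMap]
  simp only [List.nil_append]
  rw [pvA_eq_map]
  by_cases hpos : 0 < count
  · set fd := PySem.Int.floordiv (count + 9) 10 with hfd
    have hmod0 : (0 : Int) ≤ PySem.Int.mod (count + 9) 10 := PySem.Int.mod_nonneg _ (by omega)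
    have hmod1 : PySem.Int.mod (count + 9) 10 < 10 := PySem.Int.mod_lt _ (by omega)
    have hmul := PySem.Int.floordiv_mul_add_mod (count + 9) 10
    have hge : count ≤ 10 * fd := by rw [hfd]; omega
    have hfd0 : 0 ≤ fd := by omega
    have hfdn : fd = (fd.toNat : Int) := by omega
    rw [hfdn]
    simp only [pvBlock_eq]
    rw [pvBlocks_eq fd.toNat, ← hfdn]
    have hcn : count = (count.toNat : Int) := by omega
    rw [hcn, PySem.List.slice_to_natCast, ← List.map_take]
    congr 1
    rw [PySem.List.pyRange_one_append 0 count (10 * fd) (by omega) hge]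
    have hlen : (PySem.List.pyRange 0 count 1).length = count.toNat := by
      rw [PySem.List.length_pyRange_one]; omega
    rw [← hcn, ← hlen, List.take_left]
  · have h1 : PySem.List.pyRange 0 count 1 = [] :=
      PySem.List.pyRange_one_eq_nil (by omega)
    have hfdle : PySem.Int.floordiv (count + 9) 10 ≤ 0 := by
      have hmod0 : (0 : Int) ≤ PySem.Int.mod (count + 9) 10 := PySem.Int.mod_nonneg _ (by omega)
      have hmul := PySem.Int.floordiv_mul_add_mod (count + 9) 10
      omega
    have h2 : PySem.List.pyRange 0 (PySem.Int.floordiv (count + 9) 10) 1 = [] :=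
      PySem.List.pyRange_one_eq_nil (by omega)
    rw [h1, h2]
    simp [PySem.List.slice]
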